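-- pv_equiv track=rewrite | github.com/amirabdullahi1/gold | CSC 421/Assignments/Assn2/a2_q1234.py | evaluate_with_bindings
-- ===== SOURCE A (Python) =====
-- def evaluate_with_bindings(s: str, d: dict):
--     for k, v in d.items():
--         s = s.replace(k, v)
--
--     operator = s[0]
--     operands = s[1:]
--
--     if operator == '&':
--         if 'Z' in operands:
--             return 'Z'
--         if 'U' in operands:
--             return 'U'
--         return 'O'
--
--     if operator == '|':
--         if 'O' in operands:
--             return 'O'
--         if 'U' in operands:
--             return 'U'
--         return 'Z'
-- ===== SOURCE B (Python) =====
-- def evaluate_with_bindings(s: str, d: dict):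
--     for k, v in d.items():
--         s = s.replace(k, v)
--
--     operator = s[0]
--     operands = s[1:]
--
--     enc = {'Z': 0, 'U': 1, 'O': 2}
--     vals = [enc[c] for c in operands if c in enc]
--
--     if operator == '&':
--         return 'ZUO'[min(vals, default=2)]
--     if operator == '|':
--         return 'ZUO'[max(vals, default=0)]
-- ===== Notes on version B (the rewrite author's own statement) =====
-- stated objective: alternative
-- what changed: Replaces the two fixed chains of substring-membership tests per operator by encoding Z/U/O as 0/1/2 and taking the min (for '&') or max (for '|') over the encoded operands with a default, decoding the result back to a letter.
-- outside the precondition, e.g. on evaluate_with_bindings('xZ', {}): A returns None, B returns None; on evaluate_with_bindings('', {}): A raises IndexError, B raises IndexError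
import Mathlib
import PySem

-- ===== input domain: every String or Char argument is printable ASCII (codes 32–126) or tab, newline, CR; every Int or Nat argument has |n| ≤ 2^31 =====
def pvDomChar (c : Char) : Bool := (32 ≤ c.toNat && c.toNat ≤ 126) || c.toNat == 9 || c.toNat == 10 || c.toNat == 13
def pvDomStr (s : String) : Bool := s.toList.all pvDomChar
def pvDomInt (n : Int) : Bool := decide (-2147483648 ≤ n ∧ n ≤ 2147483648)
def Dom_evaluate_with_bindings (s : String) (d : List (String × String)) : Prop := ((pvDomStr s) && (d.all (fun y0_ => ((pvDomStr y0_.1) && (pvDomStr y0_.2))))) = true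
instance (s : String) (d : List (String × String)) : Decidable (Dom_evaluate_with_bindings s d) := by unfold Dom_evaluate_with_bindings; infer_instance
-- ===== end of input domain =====

-- ===== PORT A =====
-- B differs from A only after the substitution loop: it encodes Z/U/O as 0/1/2 and takes a
-- min/max over the encoded operands instead of A's fixed chains of membership tests.
-- Shared substitution loop: dict built Python-style (later duplicate key overwrites), then
-- s = s.replace(k, v) for each item in insertion order.
def substAll (s : String) (d : List (String × String)) : String :=
  ((PySem.Dict.ofList d).items).foldl (fun acc kv => PySem.Str.replace acc kv.1 kv.2) s

def evaluate_with_bindings (s : String) (d : List (String × String)) : String :=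
  let t := substAll s d
  let cs := t.toList
  let operator := PySem.List.pyGetD cs 0 ' '            -- s[0]; IndexError on empty excluded by Pre_
  let operands := PySem.List.slice cs (some 1) none     -- s[1:]
  if operator = '&' then
    if 'Z' ∈ operands then "Z"                          -- 'Z' in operands (single char ⇒ membership)
    else if 'U' ∈ operands then "U"
    else "O"
  else if operator = '|' then
    if 'O' ∈ operands then "O"
    else if 'U' ∈ operands then "U"
    else "Z"
  else ""                                               -- Python returns None here; excluded by Pre_

-- ===== PORT B =====
def encB (c : Char) : Option Nat :=                      -- the dict {'Z':0,'U':1,'O':2} as a lookup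
  if c = 'Z' then some 0 else if c = 'U' then some 1 else if c = 'O' then some 2 else none

def evaluate_with_bindings_alt (s : String) (d : List (String × String)) : String :=
  let t := substAll s d
  let cs := t.toList
  let operator := PySem.List.pyGetD cs 0 ' '
  let operands := PySem.List.slice cs (some 1) none
  let vals := operands.filterMap encB                    -- [enc[c] for c in operands if c in enc]
  -- min(vals, default=2) / max(vals, default=0): exact as a fold since every value is in {0,1,2}
  if operator = '&' then String.mk [['Z', 'U', 'O'].getD (vals.foldr min 2) 'O']
  else if operator = '|' then String.mk [['Z', 'U', 'O'].getD (vals.foldr max 0) 'Z']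
  else ""                                                -- Python returns None here; excluded by Pre_

-- ===== PRECONDITION & SPEC =====
-- Pre_ excludes inputs where the substituted string is empty (Python A raises IndexError on s[0])
-- and where its first character is neither '&' nor '|' (Python A falls through and returns None,
-- which is not a str).
def Pre_evaluate_with_bindings (s : String) (d : List (String × String)) : Prop :=
  (substAll s d).toList ≠ [] ∧
    ((substAll s d).toList.headD ' ' = '&' ∨ (substAll s d).toList.headD ' ' = '|')
instance (s : String) (d : List (String × String)) : Decidable (Pre_evaluate_with_bindings s d) := by
  unfold Pre_evaluate_with_bindings; infer_instance

def pvWitness_evaluate_with_bindings : String × (List (String × String)) := ("&ZU", [])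

def Spec_evaluate_with_bindings (s : String) (d : List (String × String)) (out : String) : Prop := out = evaluate_with_bindings_alt s d
instance (s : String) (d : List (String × String)) (out : String) : Decidable (Spec_evaluate_with_bindings s d out) := by unfold Spec_evaluate_with_bindings; infer_instance

-- ===== CLAIM (what is proved, stated in full; the proofs are below) =====
def Claim_equal_evaluate_with_bindings : Prop := ∀ (s : String) (d : List (String × String)), Dom_evaluate_with_bindings s d → Pre_evaluate_with_bindings s d → Spec_evaluate_with_bindings s d (evaluate_with_bindings s d)

-- ===== LEMMAS AND PROOFS =====
theorem foldr_min_enc (l : List Char) :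
    (l.filterMap encB).foldr min 2 = (if 'Z' ∈ l then 0 else if 'U' ∈ l then 1 else 2) := by
  induction l with
  | nil => simp
  | cons c l ih =>
    rw [List.filterMap_cons]
    by_cases hz : c = 'Z'
    · subst hz
      rw [show encB 'Z' = some 0 from rfl, List.foldr_cons, ih]
      simp [List.mem_cons]
    · by_cases hu : c = 'U'
      · subst hu
        rw [show encB 'U' = some 1 from rfl, List.foldr_cons, ih]
        simp only [List.mem_cons, show ('Z' = 'U') = False by simp, false_or, true_or,
          show ('U' = 'U') = True by simp]
        split_ifs <;> omega
      · by_cases ho : c = 'O'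
        · subst ho
          rw [show encB 'O' = some 2 from rfl, List.foldr_cons, ih]
          simp only [List.mem_cons, show ('Z' = 'O') = False by simp,
            show ('U' = 'O') = False by simp, false_or]
          split_ifs <;> omega
        · rw [show encB c = none by simp [encB, hz, hu, ho], ih]
          simp [List.mem_cons, Ne.symm hz, Ne.symm hu]

theorem foldr_max_enc (l : List Char) :
    (l.filterMap encB).foldr max 0 = (if 'O' ∈ l then 2 else if 'U' ∈ l then 1 else 0) := by
  induction l with
  | nil => simp
  | cons c l ih =>
    rw [List.filterMap_cons]
    by_cases ho : c = 'O'
    · subst ho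
      rw [show encB 'O' = some 2 from rfl, List.foldr_cons, ih]
      simp only [List.mem_cons, show ('O' = 'O') = True by simp, true_or, if_true]
      split_ifs <;> omega
    · by_cases hu : c = 'U'
      · subst hu
        rw [show encB 'U' = some 1 from rfl, List.foldr_cons, ih]
        simp only [List.mem_cons, show ('O' = 'U') = False by simp, false_or,
          show ('U' = 'U') = True by simp, true_or]
        split_ifs <;> omega
      · by_cases hz : c = 'Z'
        · subst hz
          rw [show encB 'Z' = some 0 from rfl, List.foldr_cons, ih]
          simp only [List.mem_cons, show ('O' = 'Z') = False by simp,
            show ('U' = 'Z') = False by simp, false_or]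
          split_ifs <;> omega
        · rw [show encB c = none by simp [encB, hz, hu, ho], ih]
          simp [List.mem_cons, Ne.symm ho, Ne.symm hu]

-- ===== VERDICT (by name: the statement is the Claim_ definition above) =====
theorem evaluate_with_bindings_spec : Claim_equal_evaluate_with_bindings := by
  intro s d _ hpre
  unfold Pre_evaluate_with_bindings at hpre
  obtain ⟨hne, hop⟩ := hpre
  unfold Spec_evaluate_with_bindings evaluate_with_bindings evaluate_with_bindings_alt
  cases hcs : (substAll s d).toList with
  | nil => exact absurd hcs hne
  | cons c rest =>
    rw [hcs] at hop
    simp only [hcs, PySem.List.pyGetD_zero_cons, PySem.List.slice_from_one, List.tail_cons,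
      List.headD_cons] at *
    rcases hop with h | h <;> subst h <;>
      simp [foldr_min_enc, foldr_max_enc] <;> split_ifs <;> rfl
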